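-- pv_equiv track=rewrite | github.com/syncpulse-solutions/satif | libs/sdk/scripts/copy_docs_to_docusaurus.py | organize_module_content
-- ===== SOURCE A (Python) =====
-- def organize_module_content(content: str, module_name: str) -> str:
--     """Organize module content into cleaner sections like LangChain docs."""
--     # Create a cleaner module header
--     clean_module_name = module_name.replace("satif_sdk.", "").replace("_", " ").title()
--
--     # Split content into sections
--     lines = content.split("\n")
--     organized_lines = []
--     current_section = []
--
--     # Group functions and classes
--     classes = []
--     functions = []
--     current_item = []
--     in_class = False
--     in_function = False
--
--     for line in lines:
--         # Detect class definitions
--         if line.startswith("### class ") or line.startswith("### *class*"):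
--             if current_item:
--                 if in_class:
--                     classes.append("\n".join(current_item))
--                 elif in_function:
--                     functions.append("\n".join(current_item))
--                 current_item = []
--             current_item.append(line)
--             in_class = True
--             in_function = False
--         # Detect function definitions
--         elif (
--             line.startswith("### ") and "(" in line and not line.startswith("### class")
--         ):
--             if current_item:
--                 if in_class:
--                     classes.append("\n".join(current_item))
--                 elif in_function:
--                     functions.append("\n".join(current_item))
--                 current_item = []
--             current_item.append(line)
--             in_class = False
--             in_function = True
--         # Continue current item
--         elif in_class or in_function:
--             current_item.append(line)
--         # Regular content
--         else:
--             if current_item: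
--                 if in_class:
--                     classes.append("\n".join(current_item))
--                 elif in_function:
--                     functions.append("\n".join(current_item))
--                 current_item = []
--                 in_class = False
--                 in_function = False
--             organized_lines.append(line)
--
--     # Add the last item
--     if current_item:
--         if in_class:
--             classes.append("\n".join(current_item))
--         elif in_function:
--             functions.append("\n".join(current_item))
--
--     # Rebuild content with better organization
--     result = "\n".join(organized_lines)
--
--     if classes:
--         result += "\n\n## Classes\n\n"
--         result += "\n\n".join(classes)
--
--     if functions:
--         result += "\n\n## Functions\n\n"
--         result += "\n\n".join(functions)
--
--     return result
-- ===== SOURCE B (Python) =====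
-- def _is_class(line):
--     return line.startswith("### class ") or line.startswith("### *class*")
--
--
-- def _is_marker(line):
--     return _is_class(line) or (
--         line.startswith("### ") and "(" in line and not line.startswith("### class")
--     )
--
--
-- def organize_module_content(content: str, module_name: str) -> str:
--     """Organize module content into cleaner sections like LangChain docs."""
--     lines = content.split("\n")
--
--     # Pass 1: split into the prefix (lines before the first marker) and
--     # segments, each running from one marker line to just before the next.
--     prefix = []
--     segments = []
--     for line in lines:
--         if _is_marker(line):
--             segments.append([line])
--         elif segments:
--             segments[-1].append(line)
--         else:
--             prefix.append(line)
--
--     # Pass 2: classify each segment by its marker line.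
--     classes = ["\n".join(seg) for seg in segments if _is_class(seg[0])]
--     functions = ["\n".join(seg) for seg in segments if not _is_class(seg[0])]
--
--     result = "\n".join(prefix)
--     if classes:
--         result += "\n\n## Classes\n\n" + "\n\n".join(classes)
--     if functions:
--         result += "\n\n## Functions\n\n" + "\n\n".join(functions)
--     return result
-- ===== Notes on version B (the rewrite author's own statement) =====
-- stated objective: simpler
-- what changed: Replaces A's single-pass state machine (in_class/in_function flags with current_item flushing at four sites) by a two-pass decomposition: one pass splits the lines into a prefix and marker-led segments, a second pass classifies each segment by its first line.
import Mathlib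
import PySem

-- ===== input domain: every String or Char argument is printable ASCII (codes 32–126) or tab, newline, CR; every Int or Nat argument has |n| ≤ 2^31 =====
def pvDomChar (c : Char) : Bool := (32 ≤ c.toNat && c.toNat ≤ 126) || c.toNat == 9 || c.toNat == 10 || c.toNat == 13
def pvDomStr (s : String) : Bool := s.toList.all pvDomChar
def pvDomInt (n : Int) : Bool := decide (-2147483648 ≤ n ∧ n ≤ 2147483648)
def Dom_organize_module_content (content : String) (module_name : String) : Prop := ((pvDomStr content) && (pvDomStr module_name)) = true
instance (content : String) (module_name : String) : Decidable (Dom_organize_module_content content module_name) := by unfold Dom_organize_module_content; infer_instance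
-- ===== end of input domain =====

-- B replaces A's flag-driven single pass (in_class/in_function/current_item flushing) by a
-- two-pass decomposition: split the lines into a prefix and marker-led segments, then classify
-- each finished segment by its first line (objective: simpler).

-- ===== PORT A =====

-- str.title(), ported by hand (PySem has no title); exact on the ASCII domain, where the
-- cased characters are exactly the alphabetic ones.  (A computes this value but never uses it.)
def pvTitleChars : List Char → Bool → List Char
  | [], _ => []
  | c :: cs, prevAlpha =>
      (if PySem.Chars.isalpha c then
        (if prevAlpha then PySem.Chars.lowerChar c else PySem.Chars.upperChar c)
       else c) :: pvTitleChars cs (PySem.Chars.isalpha c)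

def pvTitle (s : String) : String := String.ofList (pvTitleChars s.toList false)

-- A's loop over the lines; state = (organized_lines, classes, functions, current_item, in_class, in_function)
def pvLoopA : List String → List String → List String → List String → List String → Bool → Bool →
    List String × List String × List String
  | [], org, cl, fn, cur, inC, inF =>
      -- "Add the last item"
      if cur ≠ [] then
        if inC then (org, cl ++ [PySem.Str.join "\n" cur], fn)
        else if inF then (org, cl, fn ++ [PySem.Str.join "\n" cur])
        else (org, cl, fn)
      else (org, cl, fn)
  | line :: rest, org, cl, fn, cur, inC, inF =>
      if PySem.Str.startswith line "### class " || PySem.Str.startswith line "### *class*" then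
        let clfn :=
          if cur ≠ [] then
            if inC then (cl ++ [PySem.Str.join "\n" cur], fn)
            else if inF then (cl, fn ++ [PySem.Str.join "\n" cur])
            else (cl, fn)
          else (cl, fn)
        pvLoopA rest org clfn.1 clfn.2 [line] true false
      else if PySem.Str.startswith line "### " && PySem.Str.isIn "(" line &&
              !PySem.Str.startswith line "### class" then
        let clfn :=
          if cur ≠ [] then
            if inC then (cl ++ [PySem.Str.join "\n" cur], fn)
            else if inF then (cl, fn ++ [PySem.Str.join "\n" cur])
            else (cl, fn)
          else (cl, fn)
        pvLoopA rest org clfn.1 clfn.2 [line] false true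
      else if inC || inF then
        pvLoopA rest org cl fn (cur ++ [line]) inC inF
      else
        if cur ≠ [] then
          let clfn :=
            if inC then (cl ++ [PySem.Str.join "\n" cur], fn)
            else if inF then (cl, fn ++ [PySem.Str.join "\n" cur])
            else (cl, fn)
          pvLoopA rest (org ++ [line]) clfn.1 clfn.2 [] false false
        else
          pvLoopA rest (org ++ [line]) cl fn cur inC inF

def organize_module_content (content : String) (module_name : String) : String :=
  let _clean_module_name :=
    pvTitle (PySem.Str.replace (PySem.Str.replace module_name "satif_sdk." "") "_" " ")
  -- the separator is the literal "\n" ≠ "", so split? is always some; the default is never used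
  let lines := (PySem.Str.split? content "\n").getD []
  let r := pvLoopA lines [] [] [] [] false false
  let result := PySem.Str.join "\n" r.1
  let result := if r.2.1 ≠ [] then result ++ "\n\n## Classes\n\n" ++ PySem.Str.join "\n\n" r.2.1 else result
  let result := if r.2.2 ≠ [] then result ++ "\n\n## Functions\n\n" ++ PySem.Str.join "\n\n" r.2.2 else result
  result

-- ===== PORT B =====

def pvIsClass (line : String) : Bool :=
  PySem.Str.startswith line "### class " || PySem.Str.startswith line "### *class*"

def pvIsMarker (line : String) : Bool :=
  pvIsClass line ||
    (PySem.Str.startswith line "### " && PySem.Str.isIn "(" line &&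
      !PySem.Str.startswith line "### class")

-- segments[-1].append(line)
def pvPushLast (x : String) : List (List String) → List (List String)
  | [] => []
  | [s] => [s ++ [x]]
  | s :: t => s :: pvPushLast x t

-- B's pass 1: split the lines into the prefix and the marker-led segments
def pvLoopB : List String → List String → List (List String) → List String × List (List String)
  | [], p, segs => (p, segs)
  | line :: rest, p, segs =>
      if pvIsMarker line then pvLoopB rest p (segs ++ [[line]])
      else if segs ≠ [] then pvLoopB rest p (pvPushLast line segs)
      else pvLoopB rest (p ++ [line]) segs

-- B's pass 2: the two comprehensions (every segment is nonempty by construction, so headD "" is seg[0])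
def pvClassJoins (segs : List (List String)) : List String :=
  (segs.filter (fun s => pvIsClass (s.headD ""))).map (PySem.Str.join "\n")

def pvFuncJoins (segs : List (List String)) : List String :=
  (segs.filter (fun s => !pvIsClass (s.headD ""))).map (PySem.Str.join "\n")

def organize_module_content_alt (content : String) (module_name : String) : String :=
  let lines := (PySem.Str.split? content "\n").getD []
  let r := pvLoopB lines [] []
  let classes := pvClassJoins r.2
  let functions := pvFuncJoins r.2
  let result := PySem.Str.join "\n" r.1
  let result := if classes ≠ [] then result ++ "\n\n## Classes\n\n" ++ PySem.Str.join "\n\n" classes else result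
  let result := if functions ≠ [] then result ++ "\n\n## Functions\n\n" ++ PySem.Str.join "\n\n" functions else result
  result

-- ===== PRECONDITION & SPEC =====
def Spec_organize_module_content (content : String) (module_name : String) (out : String) : Prop := out = organize_module_content_alt content module_name
instance (content : String) (module_name : String) (out : String) : Decidable (Spec_organize_module_content content module_name out) := by unfold Spec_organize_module_content; infer_instance

-- ===== CLAIM (what is proved, stated in full; the proofs are below) =====
def Claim_equal_organize_module_content : Prop := ∀ (content : String) (module_name : String), Dom_organize_module_content content module_name → Spec_organize_module_content content module_name (organize_module_content content module_name)

-- ===== LEMMAS AND PROOFS =====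

lemma pvPushLast_ne_nil (x : String) (segs : List (List String)) (h : segs ≠ []) :
    pvPushLast x segs ≠ [] := by
  cases segs with
  | nil => exact absurd rfl h
  | cons s t => cases t <;> simp [pvPushLast]

lemma pvPushLast_append (x : String) (T segs : List (List String)) (h : segs ≠ []) :
    pvPushLast x (T ++ segs) = T ++ pvPushLast x segs := by
  induction T with
  | nil => rfl
  | cons s T ih =>
      have hne : T ++ segs ≠ [] := by simp [h]
      cases hTs : T ++ segs with
      | nil => exact absurd hTs hne
      | cons a t =>
          show pvPushLast x (s :: (T ++ segs)) = s :: (T ++ pvPushLast x segs)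
          rw [hTs, show pvPushLast x (s :: a :: t) = s :: pvPushLast x (a :: t) from rfl, ← hTs, ih]

-- pvLoopB with a nonempty segment list never touches the prefix
lemma pvLoopB_fst (ls : List String) (p : List String) (segs : List (List String)) (h : segs ≠ []) :
    (pvLoopB ls p segs).1 = p := by
  induction ls generalizing segs with
  | nil => rfl
  | cons line rest ih =>
      by_cases hm : pvIsMarker line = true
      · simpa [pvLoopB, hm] using ih (segs ++ [[line]]) (by simp)
      · simpa [pvLoopB, hm, h] using ih (pvPushLast line segs) (pvPushLast_ne_nil _ _ h)

-- pvLoopB only ever extends the tail of a nonempty segment list: a closed prefix passes through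
lemma pvLoopB_prefix (ls : List String) (p : List String) (T segs : List (List String)) (h : segs ≠ []) :
    pvLoopB ls p (T ++ segs) = ((pvLoopB ls p segs).1, T ++ (pvLoopB ls p segs).2) := by
  induction ls generalizing segs with
  | nil => rfl
  | cons line rest ih =>
      by_cases hm : pvIsMarker line = true
      · have := ih (segs ++ [[line]]) (by simp)
        simpa [pvLoopB, hm, List.append_assoc] using this
      · have h' : T ++ segs ≠ [] := by simp [h]
        have := ih (pvPushLast line segs) (pvPushLast_ne_nil _ _ h)
        simpa [pvLoopB, hm, h, h', pvPushLast_append line T segs h] using this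

lemma pvClassJoins_append (S T : List (List String)) :
    pvClassJoins (S ++ T) = pvClassJoins S ++ pvClassJoins T := by
  simp [pvClassJoins]

lemma pvFuncJoins_append (S T : List (List String)) :
    pvFuncJoins (S ++ T) = pvFuncJoins S ++ pvFuncJoins T := by
  simp [pvFuncJoins]

-- the "open item" invariant: once a marker line has been seen, A carries the current segment in
-- current_item with in_class = pvIsClass of its marker line and in_function its negation, and B
-- carries the same segment as the last (still open) segment.
lemma pvLoopA_open (ls : List String) (p : List String) :
    ∀ (cl fn cur : List String) (b : Bool), cur ≠ [] → b = pvIsClass (cur.headD "") →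
    pvLoopA ls p cl fn cur b (!b) =
      (p, cl ++ pvClassJoins (pvLoopB ls p [cur]).2, fn ++ pvFuncJoins (pvLoopB ls p [cur]).2) := by
  induction ls with
  | nil =>
      intro cl fn cur b hcur hb
      cases cur with
      | nil => exact absurd rfl hcur
      | cons c0 cs =>
          simp only [List.headD_cons] at hb
          cases b with
          | false => simp [pvLoopA, pvLoopB, pvClassJoins, pvFuncJoins, ← hb]
          | true => simp [pvLoopA, pvLoopB, pvClassJoins, pvFuncJoins, ← hb]
  | cons line rest ih =>
      intro cl fn cur b hcur hb
      obtain ⟨c0, cs, rfl⟩ : ∃ c0 cs, cur = c0 :: cs := by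
        cases cur with
        | nil => exact absurd rfl hcur
        | cons c0 cs => exact ⟨c0, cs, rfl⟩
      simp only [List.headD_cons] at hb
      by_cases hcl : (PySem.Str.startswith line "### class "
          || PySem.Str.startswith line "### *class*") = true
      · -- class marker: A flushes the open item and opens [line] as a class item
        have hm : pvIsMarker line = true := by unfold pvIsMarker pvIsClass; rw [hcl, Bool.true_or]
        have hB2 : (pvLoopB (line :: rest) p [c0 :: cs]).2
            = [c0 :: cs] ++ (pvLoopB rest p [[line]]).2 := by
          rw [show pvLoopB (line :: rest) p [c0 :: cs]
              = pvLoopB rest p ([c0 :: cs] ++ [[line]]) by simp [pvLoopB, hm],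
            pvLoopB_prefix rest p [c0 :: cs] [[line]] (by simp)]
        cases b with
        | true =>
            rw [show pvLoopA (line :: rest) p cl fn (c0 :: cs) true (!true)
                = pvLoopA rest p (cl ++ [PySem.Str.join "\n" (c0 :: cs)]) fn [line] true false by
              rw [pvLoopA, if_pos hcl]; simp]
            rw [show (false : Bool) = !true from rfl,
              ih (cl ++ [PySem.Str.join "\n" (c0 :: cs)]) fn [line] true (by simp)
                (by unfold pvIsClass; exact hcl.symm),
              hB2, pvClassJoins_append, pvFuncJoins_append]
            simp [pvClassJoins, pvFuncJoins, ← hb]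
        | false =>
            rw [show pvLoopA (line :: rest) p cl fn (c0 :: cs) false (!false)
                = pvLoopA rest p cl (fn ++ [PySem.Str.join "\n" (c0 :: cs)]) [line] true false by
              rw [pvLoopA, if_pos hcl]; simp]
            rw [show (false : Bool) = !true from rfl,
              ih cl (fn ++ [PySem.Str.join "\n" (c0 :: cs)]) [line] true (by simp)
                (by unfold pvIsClass; exact hcl.symm),
              hB2, pvClassJoins_append, pvFuncJoins_append]
            simp [pvClassJoins, pvFuncJoins, ← hb]
      · by_cases hfn : (PySem.Str.startswith line "### " && PySem.Str.isIn "(" line &&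
            !PySem.Str.startswith line "### class") = true
        · -- function marker: A flushes the open item and opens [line] as a function item
          have hm : pvIsMarker line = true := by unfold pvIsMarker pvIsClass; rw [Bool.eq_false_iff.mpr hcl, Bool.false_or, hfn]
          have hclF : pvIsClass line = false := by
            unfold pvIsClass; exact Bool.eq_false_iff.mpr hcl
          have hB2 : (pvLoopB (line :: rest) p [c0 :: cs]).2
              = [c0 :: cs] ++ (pvLoopB rest p [[line]]).2 := by
            rw [show pvLoopB (line :: rest) p [c0 :: cs]
                = pvLoopB rest p ([c0 :: cs] ++ [[line]]) by simp [pvLoopB, hm],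
              pvLoopB_prefix rest p [c0 :: cs] [[line]] (by simp)]
          cases b with
          | true =>
              rw [show pvLoopA (line :: rest) p cl fn (c0 :: cs) true (!true)
                  = pvLoopA rest p (cl ++ [PySem.Str.join "\n" (c0 :: cs)]) fn [line] false true by
                rw [pvLoopA, if_neg (by rw [show (PySem.Str.startswith line "### class "
                    || PySem.Str.startswith line "### *class*") = false from Bool.eq_false_iff.mpr hcl]; simp),
                  if_pos hfn]; simp]
              rw [show (true : Bool) = !false from rfl,
                ih (cl ++ [PySem.Str.join "\n" (c0 :: cs)]) fn [line] false (by simp)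
                  (by rw [List.headD_cons, hclF]),
                hB2, pvClassJoins_append, pvFuncJoins_append]
              simp [pvClassJoins, pvFuncJoins, ← hb]
          | false =>
              rw [show pvLoopA (line :: rest) p cl fn (c0 :: cs) false (!false)
                  = pvLoopA rest p cl (fn ++ [PySem.Str.join "\n" (c0 :: cs)]) [line] false true by
                rw [pvLoopA, if_neg (by rw [show (PySem.Str.startswith line "### class "
                    || PySem.Str.startswith line "### *class*") = false from Bool.eq_false_iff.mpr hcl]; simp),
                  if_pos hfn]; simp]
              rw [show (true : Bool) = !false from rfl,
                ih cl (fn ++ [PySem.Str.join "\n" (c0 :: cs)]) [line] false (by simp)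
                  (by rw [List.headD_cons, hclF]),
                hB2, pvClassJoins_append, pvFuncJoins_append]
              simp [pvClassJoins, pvFuncJoins, ← hb]
        · -- neither marker: the line continues the open item / the open segment
          have hclF : (PySem.Str.startswith line "### class "
              || PySem.Str.startswith line "### *class*") = false := Bool.eq_false_iff.mpr hcl
          have hfnF : (PySem.Str.startswith line "### " && PySem.Str.isIn "(" line &&
              !PySem.Str.startswith line "### class") = false := Bool.eq_false_iff.mpr hfn
          have hm : pvIsMarker line = false := by
            unfold pvIsMarker pvIsClass; rw [hclF, Bool.false_or, hfnF]
          have hA : pvLoopA (line :: rest) p cl fn (c0 :: cs) b (!b)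
              = pvLoopA rest p cl fn ((c0 :: cs) ++ [line]) b (!b) := by
            cases b <;>
              (rw [pvLoopA, if_neg (by rw [hclF]; simp), if_neg (by rw [hfnF]; simp)]; rfl)
          have hB : pvLoopB (line :: rest) p [c0 :: cs]
              = pvLoopB rest p [(c0 :: cs) ++ [line]] := by
            simp [pvLoopB, hm, pvPushLast]
          rw [hA, hB, ih cl fn ((c0 :: cs) ++ [line]) b (by simp) (by simpa using hb)]

-- the "no open item yet" invariant
lemma pvLoopA_closed (ls : List String) :
    ∀ (p cl fn : List String),
    pvLoopA ls p cl fn [] false false =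
      ((pvLoopB ls p []).1, cl ++ pvClassJoins (pvLoopB ls p []).2, fn ++ pvFuncJoins (pvLoopB ls p []).2) := by
  induction ls with
  | nil => intro p cl fn; simp [pvLoopA, pvLoopB, pvClassJoins, pvFuncJoins]
  | cons line rest ih =>
      intro p cl fn
      by_cases hcl : (PySem.Str.startswith line "### class "
          || PySem.Str.startswith line "### *class*") = true
      · have hm : pvIsMarker line = true := by unfold pvIsMarker pvIsClass; rw [hcl, Bool.true_or]
        have hB : pvLoopB (line :: rest) p [] = pvLoopB rest p [[line]] := by
          simp [pvLoopB, hm]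
        have hopen := pvLoopA_open rest p cl fn [line] true (by simp) (by unfold pvIsClass; exact hcl.symm)
        rw [show pvLoopA (line :: rest) p cl fn [] false false
            = pvLoopA rest p cl fn [line] true false by rw [pvLoopA, if_pos hcl]; simp,
          hB, show (pvLoopB rest p [[line]]).1 = p from pvLoopB_fst rest p [[line]] (by simp)] at *
        rw [show (false : Bool) = !true from rfl, hopen]
      · by_cases hfn : (PySem.Str.startswith line "### " && PySem.Str.isIn "(" line &&
            !PySem.Str.startswith line "### class") = true
        · have hm : pvIsMarker line = true := by unfold pvIsMarker pvIsClass; rw [Bool.eq_false_iff.mpr hcl, Bool.false_or, hfn]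
          have hclF : pvIsClass line = false := by
            unfold pvIsClass; exact Bool.eq_false_iff.mpr hcl
          have hB : pvLoopB (line :: rest) p [] = pvLoopB rest p [[line]] := by
            simp [pvLoopB, hm]
          have hopen := pvLoopA_open rest p cl fn [line] false (by simp) (by rw [List.headD_cons, hclF])
          rw [show pvLoopA (line :: rest) p cl fn [] false false
              = pvLoopA rest p cl fn [line] false true by
            rw [pvLoopA, if_neg (by rw [show (PySem.Str.startswith line "### class "
                || PySem.Str.startswith line "### *class*") = false from Bool.eq_false_iff.mpr hcl]; simp),
              if_pos hfn]; simp,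
            hB, show (pvLoopB rest p [[line]]).1 = p from pvLoopB_fst rest p [[line]] (by simp)]
          rw [show (true : Bool) = !false from rfl, hopen]
        · have hclF : (PySem.Str.startswith line "### class "
              || PySem.Str.startswith line "### *class*") = false := Bool.eq_false_iff.mpr hcl
          have hfnF : (PySem.Str.startswith line "### " && PySem.Str.isIn "(" line &&
              !PySem.Str.startswith line "### class") = false := Bool.eq_false_iff.mpr hfn
          have hm : pvIsMarker line = false := by
            unfold pvIsMarker pvIsClass; rw [hclF, Bool.false_or, hfnF]
          rw [show pvLoopA (line :: rest) p cl fn [] false false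
              = pvLoopA rest (p ++ [line]) cl fn [] false false by
            rw [pvLoopA, if_neg (by rw [hclF]; simp), if_neg (by rw [hfnF]; simp),
              if_neg (by simp), if_neg (by simp)],
            show pvLoopB (line :: rest) p [] = pvLoopB rest (p ++ [line]) [] by
              simp [pvLoopB, hm],
            ih]

-- ===== VERDICT (by name: the statement is the Claim_ definition above) =====
theorem organize_module_content_spec : Claim_equal_organize_module_content := by
  intro content module_name _
  show organize_module_content content module_name = organize_module_content_alt content module_name
  simp only [organize_module_content, organize_module_content_alt, pvLoopA_closed, List.nil_append]
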